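-- pv_equiv track=rewrite | github.com/Manticoree/lidco | src/lidco/ui/diff_renderer.py | _fold_unchanged
-- ===== SOURCE A (Python) =====
-- def _fold_unchanged(lines: list[str], context: int = 3) -> list[str]:
--     """Fold unchanged regions, keeping *context* lines around changes."""
--     if context < 0:
--         return list(lines)
--
--     # Mark lines that are changes
--     change_indices: set[int] = set()
--     for i, line in enumerate(lines):
--         if line.startswith("+") or line.startswith("-"):
--             # Skip the --- / +++ header lines
--             if line.startswith("---") or line.startswith("+++"):
--                 change_indices.add(i)
--                 continue
--             change_indices.add(i)
--
--     if not change_indices: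
--         return list(lines)
--
--     # Mark context lines around changes
--     visible: set[int] = set()
--     for idx in change_indices:
--         for offset in range(-context, context + 1):
--             pos = idx + offset
--             if 0 <= pos < len(lines):
--                 visible.add(pos)
--
--     # Also always show header lines (@@, ---, +++)
--     for i, line in enumerate(lines):
--         if line.startswith("@@") or line.startswith("---") or line.startswith("+++"):
--             visible.add(i)
--
--     result: list[str] = []
--     last_shown = -1
--     for i in range(len(lines)):
--         if i in visible:
--             if last_shown >= 0 and i - last_shown > 1:
--                 skipped = i - last_shown - 1
--                 result.append(f"... ({skipped} lines folded) ...")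
--             result.append(lines[i])
--             last_shown = i
--
--     if last_shown < len(lines) - 1 and last_shown >= 0:
--         skipped = len(lines) - 1 - last_shown
--         result.append(f"... ({skipped} lines folded) ...")
--
--     return result
-- ===== SOURCE B (Python) =====
-- def _fold_unchanged(lines: list[str], context: int = 3) -> list[str]:
--     """Fold unchanged regions, keeping *context* lines around changes."""
--     if context < 0:
--         return list(lines)
--     n = len(lines)
--     changed = [ln.startswith("+") or ln.startswith("-") for ln in lines]
--     if True not in changed:
--         return list(lines)
--
--     # distance to the nearest change, via two linear sweeps (n = "none on this side")
--     fwd = []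
--     d = n
--     for c in changed:
--         d = 0 if c else min(d + 1, n)
--         fwd.append(d)
--     bwd = []
--     d = n
--     for c in reversed(changed):
--         d = 0 if c else min(d + 1, n)
--         bwd.append(d)
--     bwd.reverse()
--
--     visible = [i for i in range(n)
--                if min(fwd[i], bwd[i]) <= context
--                or lines[i].startswith(("@@", "---", "+++"))]
--
--     out: list[str] = []
--     prev = -1
--     for i in visible:
--         if prev >= 0 and i - prev > 1:
--             out.append(f"... ({i - prev - 1} lines folded) ...")
--         out.append(lines[i])
--         prev = i
--     if 0 <= prev < n - 1:
--         out.append(f"... ({n - 1 - prev} lines folded) ...")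
--     return out
-- ===== Notes on version B (the rewrite author's own statement) =====
-- stated objective: alternative
-- what changed: Replaces A's per-change offset-window expansion into a membership set (plus a per-index set lookup loop) by two linear sweeps that track the distance to the nearest change line, then a single filtered index walk emitting lines and fold markers.
import Mathlib
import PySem

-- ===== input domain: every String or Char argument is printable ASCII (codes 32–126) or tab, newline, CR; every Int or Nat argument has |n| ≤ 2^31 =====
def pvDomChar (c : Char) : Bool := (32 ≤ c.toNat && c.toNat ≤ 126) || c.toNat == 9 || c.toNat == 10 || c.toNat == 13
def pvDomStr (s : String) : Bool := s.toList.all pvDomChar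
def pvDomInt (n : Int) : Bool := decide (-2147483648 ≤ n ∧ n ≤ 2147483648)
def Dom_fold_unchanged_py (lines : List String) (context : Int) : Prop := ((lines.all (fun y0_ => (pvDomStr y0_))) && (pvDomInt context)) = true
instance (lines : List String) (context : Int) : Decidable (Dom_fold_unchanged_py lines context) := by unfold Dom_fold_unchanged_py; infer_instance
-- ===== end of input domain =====

-- B replaces A's per-change window expansion over sets by two linear distance sweeps plus a
-- filtered index walk (alternative decomposition; return value only, neither mutates its input).

-- ===== PORT A =====
def fold_unchanged_py (lines : List String) (context : Int) : List String :=
  if context < 0 then lines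
  else
    let change : PySem.Set Int :=
      (PySem.List.enumerate lines).foldl (fun s p =>
        if PySem.Str.startswith p.2 "+" || PySem.Str.startswith p.2 "-" then
          if PySem.Str.startswith p.2 "---" || PySem.Str.startswith p.2 "+++" then
            PySem.Set.add s p.1
          else
            PySem.Set.add s p.1
        else s) PySem.Set.empty
    if change = [] then lines
    else
      let visible : PySem.Set Int :=
        change.foldl (fun v idx =>
          (PySem.List.pyRange (-context) (context + 1) 1).foldl (fun v off =>
            let pos := idx + off
            if 0 ≤ pos ∧ pos < (lines.length : Int) then PySem.Set.add v pos else v) v)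
          PySem.Set.empty
      let visible :=
        (PySem.List.enumerate lines).foldl (fun v p =>
          if PySem.Str.startswith p.2 "@@" || PySem.Str.startswith p.2 "---" ||
             PySem.Str.startswith p.2 "+++" then PySem.Set.add v p.1 else v) visible
      let st :=
        (PySem.List.pyRange 0 (lines.length : Int) 1).foldl (fun (st : List String × Int) i =>
          if i ∈ visible then
            let r := if st.2 ≥ 0 ∧ i - st.2 > 1 then
                st.1 ++ ["... (" ++ PySem.Int.toStr (i - st.2 - 1) ++ " lines folded) ..."]
              else st.1
            (r ++ [PySem.List.pyGetD lines i ""], i)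
          else st) ([], -1)
      if st.2 < (lines.length : Int) - 1 ∧ st.2 ≥ 0 then
        st.1 ++ ["... (" ++ PySem.Int.toStr ((lines.length : Int) - 1 - st.2) ++ " lines folded) ..."]
      else st.1

-- ===== PORT B =====
def fold_unchanged_py_alt (lines : List String) (context : Int) : List String :=
  if context < 0 then lines
  else
    let n : Int := lines.length
    let changed := lines.map (fun ln => PySem.Str.startswith ln "+" || PySem.Str.startswith ln "-")
    if !changed.contains true then lines
    else
      let fwd := (changed.foldl (fun (st : List Int × Int) c =>
          let d := if c then 0 else min (st.2 + 1) n
          (st.1 ++ [d], d)) ([], n)).1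
      let bwd := (changed.reverse.foldl (fun (st : List Int × Int) c =>
          let d := if c then 0 else min (st.2 + 1) n
          (st.1 ++ [d], d)) ([], n)).1.reverse
      let visible := (PySem.List.pyRange 0 n 1).filter (fun i =>
          decide (min (PySem.List.pyGetD fwd i n) (PySem.List.pyGetD bwd i n) ≤ context) ||
          PySem.Str.startswith (PySem.List.pyGetD lines i "") "@@" ||
          PySem.Str.startswith (PySem.List.pyGetD lines i "") "---" ||
          PySem.Str.startswith (PySem.List.pyGetD lines i "") "+++")
      let st := visible.foldl (fun (st : List String × Int) i =>
          let r := if st.2 ≥ 0 ∧ i - st.2 > 1 then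
              st.1 ++ ["... (" ++ PySem.Int.toStr (i - st.2 - 1) ++ " lines folded) ..."]
            else st.1
          (r ++ [PySem.List.pyGetD lines i ""], i)) ([], -1)
      if 0 ≤ st.2 ∧ st.2 < n - 1 then
        st.1 ++ ["... (" ++ PySem.Int.toStr (n - 1 - st.2) ++ " lines folded) ..."]
      else st.1

-- ===== PRECONDITION & SPEC =====
def Spec_fold_unchanged_py (lines : List String) (context : Int) (out : List String) : Prop := out = fold_unchanged_py_alt lines context
instance (lines : List String) (context : Int) (out : List String) : Decidable (Spec_fold_unchanged_py lines context out) := by unfold Spec_fold_unchanged_py; infer_instance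

-- ===== CLAIM (what is proved, stated in full; the proofs are below) =====
def Claim_equal_fold_unchanged_py : Prop := ∀ (lines : List String) (context : Int), Dom_fold_unchanged_py lines context → Spec_fold_unchanged_py lines context (fold_unchanged_py lines context)

-- ===== LEMMAS AND PROOFS =====

-- membership in a "for x: if q x: s.add (f x)" loop over an arbitrary list
theorem mem_foldl_ite_add {α : Type} (L : List α) (q : α → Prop) [DecidablePred q]
    (f : α → Int) (s : PySem.Set Int) (x : Int) :
    (x ∈ L.foldl (fun v a => if q a then PySem.Set.add v (f a) else v) s) ↔
      x ∈ s ∨ ∃ a ∈ L, q a ∧ x = f a := by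
  induction L generalizing s with
  | nil => simp
  | cons a L ih =>
    simp only [List.foldl_cons, ih]
    by_cases hq : q a
    · simp [hq, PySem.Set.mem_add]
      try tauto
    · simp [hq]
      try tauto

-- the recursive shape of one distance sweep
def sweepD (n : Int) : Int → List Bool → List Int
  | _, [] => []
  | d, c :: cs => (if c then 0 else min (d + 1) n) :: sweepD n (if c then 0 else min (d + 1) n) cs

theorem length_sweepD (n d : Int) (cs : List Bool) : (sweepD n d cs).length = cs.length := by
  induction cs generalizing d with
  | nil => rfl
  | cons c cs ih => simp [sweepD, ih]

-- the sweep fold in port B builds acc ++ sweepD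
theorem sweep_fold (n : Int) (cs : List Bool) (acc : List Int) (d : Int) :
    (cs.foldl (fun (st : List Int × Int) c =>
        (st.1 ++ [if c then 0 else min (st.2 + 1) n], if c then 0 else min (st.2 + 1) n)) (acc, d)).1
      = acc ++ sweepD n d cs := by
  induction cs generalizing acc d with
  | nil => simp [sweepD]
  | cons c cs ih => simp [sweepD, ih]

-- what "sweep value ≤ c" means: a change at distance ≤ c on this side, or the carried
-- distance reaches, or the cap n is itself ≤ c
theorem sweepD_le (cs : List Bool) (n : Int) :
    ∀ (d : Int), 0 ≤ d → d ≤ n → ∀ (i : Nat) (h : i < cs.length) (c : Int),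
    ((sweepD n d cs)[i]'(by rw [length_sweepD]; exact h) ≤ c ↔
      (∃ j : Nat, j ≤ i ∧ cs.getD j false = true ∧ (i : Int) - j ≤ c) ∨ d + i + 1 ≤ c ∨ n ≤ c) := by
  induction cs with
  | nil => intro d _ _ i h; simp at h
  | cons c0 cs ih =>
    intro d hd0 hdn i h c
    cases i with
    | zero =>
      simp only [sweepD, List.getElem_cons_zero]
      by_cases h0 : c0 = true
      · subst h0
        rw [if_pos rfl]
        constructor
        · intro hc; exact Or.inl ⟨0, le_refl 0, by simp, by simpa using hc⟩
        · rintro (⟨j, hj, _, hjc⟩ | h2 | h2) <;> omega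
      · simp only [Bool.not_eq_true] at h0; subst h0
        simp only [Bool.false_eq_true, if_false]
        have hm1 := min_le_left (d + 1) n
        have hm2 := min_le_right (d + 1) n
        constructor
        · intro hc
          rcases min_le_iff.mp hc with h1 | h1
          · right; left; omega
          · right; right; exact h1
        · rintro (⟨j, hj, hget, hjc⟩ | h2 | h2)
          · interval_cases j; simp at hget
          · omega
          · omega
    | succ i' =>
      simp only [sweepD, List.getElem_cons_succ]
      rw [ih _ (by split <;> omega) (by split <;> omega) i' (by simpa using h) c]
      have hm1 := min_le_left (d + 1) n
      have hm2 := min_le_right (d + 1) n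
      constructor
      · rintro (⟨j, hj, hget, hjc⟩ | h2 | h2)
        · exact Or.inl ⟨j + 1, by omega, by simpa using hget, by push_cast; omega⟩
        · by_cases h0 : c0 = true
          · subst h0; rw [if_pos rfl] at h2
            exact Or.inl ⟨0, by omega, by simp, by push_cast; omega⟩
          · simp only [Bool.not_eq_true] at h0; subst h0
            simp only [Bool.false_eq_true, if_false] at h2
            rcases le_total (d + 1) n with hmn | hmn
            · rw [min_eq_left hmn] at h2; right; left; push_cast; omega
            · rw [min_eq_right hmn] at h2; right; right; omega
        · right; right; exact h2
      · rintro (⟨j, hj, hget, hjc⟩ | h2 | h2)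
        · cases j with
          | zero =>
            simp only [List.getD_cons_zero] at hget; subst hget
            right; left; rw [if_pos rfl]; push_cast at hjc ⊢; omega
          | succ j' =>
            exact Or.inl ⟨j', by omega, by simpa using hget, by push_cast at hjc ⊢; omega⟩
        · right; left
          push_cast at h2 ⊢
          split <;> omega
        · right; right; exact h2


-- Bool-condition form of the add loop
theorem mem_foldl_add_bool {α : Type} (L : List α) (q : α → Bool) (f : α → Int)
    (s : PySem.Set Int) (x : Int) :
    (x ∈ L.foldl (fun v a => if q a then PySem.Set.add v (f a) else v) s) ↔
      x ∈ s ∨ ∃ a ∈ L, q a = true ∧ x = f a :=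
  mem_foldl_ite_add L (fun a => q a = true) f s x

-- membership in port A's change-index set
theorem mem_changeA (lines : List String) (x : Int) :
    (x ∈ (PySem.List.enumerate lines).foldl (fun s p =>
        if PySem.Str.startswith p.2 "+" || PySem.Str.startswith p.2 "-" then
          if PySem.Str.startswith p.2 "---" || PySem.Str.startswith p.2 "+++" then
            PySem.Set.add s p.1
          else
            PySem.Set.add s p.1
        else s) PySem.Set.empty) ↔
      ∃ k : Nat, k < lines.length ∧ x = (k : Int) ∧
        (PySem.Str.startswith (lines.getD k "") "+" || PySem.Str.startswith (lines.getD k "") "-") = true := by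
  simp only [ite_self]
  rw [mem_foldl_add_bool (PySem.List.enumerate lines)
      (fun p => PySem.Str.startswith p.2 "+" || PySem.Str.startswith p.2 "-")
      (fun p => p.1) PySem.Set.empty x]
  constructor
  · rintro (he | ⟨p, hp, hq, rfl⟩)
    · exact absurd he (by simp [PySem.Set.empty])
    · rcases (PySem.List.mem_enumerate_iff lines 0 p).mp hp with ⟨k, hk, rfl⟩
      exact ⟨k, hk, by simp, by rw [List.getD_eq_getElem _ _ hk]; simpa using hq⟩
  · rintro ⟨k, hk, rfl, hq⟩
    refine Or.inr ⟨((0 : Int) + (k : Int), lines[k]'hk),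
      (PySem.List.mem_enumerate_iff lines 0 _).mpr ⟨k, hk, rfl⟩, ?_, by simp⟩
    rw [List.getD_eq_getElem _ _ hk] at hq; simpa using hq

theorem changeA_eq_nil_iff (lines : List String) :
    ((PySem.List.enumerate lines).foldl (fun s p =>
        if PySem.Str.startswith p.2 "+" || PySem.Str.startswith p.2 "-" then
          if PySem.Str.startswith p.2 "---" || PySem.Str.startswith p.2 "+++" then
            PySem.Set.add s p.1
          else
            PySem.Set.add s p.1
        else s) PySem.Set.empty = ([] : List Int)) ↔
      ¬∃ k : Nat, k < lines.length ∧
        (PySem.Str.startswith (lines.getD k "") "+" || PySem.Str.startswith (lines.getD k "") "-") = true := by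
  constructor
  · intro h hex
    rcases hex with ⟨k, hk, hc⟩
    have hm : ((k : Int)) ∈ (PySem.List.enumerate lines).foldl (fun s p =>
        if PySem.Str.startswith p.2 "+" || PySem.Str.startswith p.2 "-" then
          if PySem.Str.startswith p.2 "---" || PySem.Str.startswith p.2 "+++" then
            PySem.Set.add s p.1
          else
            PySem.Set.add s p.1
        else s) PySem.Set.empty := (mem_changeA lines _).mpr ⟨k, hk, rfl, hc⟩
    rw [h] at hm
    exact absurd hm (List.not_mem_nil)
  · intro hne
    by_contra hne2
    rcases List.exists_mem_of_ne_nil _ hne2 with ⟨x, hx⟩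
    rcases (mem_changeA lines x).mp hx with ⟨k, hk, rfl, hc⟩
    exact hne ⟨k, hk, hc⟩

theorem contB (lines : List String) :
    ((lines.map (fun ln => PySem.Str.startswith ln "+" || PySem.Str.startswith ln "-")).contains true = true) ↔
      ∃ k : Nat, k < lines.length ∧
        (PySem.Str.startswith (lines.getD k "") "+" || PySem.Str.startswith (lines.getD k "") "-") = true := by
  constructor
  · intro h
    have hm : true ∈ lines.map (fun ln => PySem.Str.startswith ln "+" || PySem.Str.startswith ln "-") := by
      simpa using h
    rcases List.mem_map.mp hm with ⟨a, ha, hc⟩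
    rcases List.mem_iff_getElem.mp ha with ⟨k, hk, rfl⟩
    exact ⟨k, hk, by rw [List.getD_eq_getElem _ _ hk]; exact hc⟩
  · rintro ⟨k, hk, hc⟩
    rw [List.getD_eq_getElem _ _ hk] at hc
    have hm : true ∈ lines.map (fun ln => PySem.Str.startswith ln "+" || PySem.Str.startswith ln "-") :=
      List.mem_map.mpr ⟨lines[k]'hk, List.getElem_mem hk, hc⟩
    simpa using hm

theorem guardB_iff (lines : List String) :
    (((!(lines.map (fun ln => PySem.Str.startswith ln "+" || PySem.Str.startswith ln "-")).contains true)) = true) ↔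
      ¬∃ k : Nat, k < lines.length ∧
        (PySem.Str.startswith (lines.getD k "") "+" || PySem.Str.startswith (lines.getD k "") "-") = true := by
  rw [Bool.not_eq_true']
  constructor
  · intro h hex
    have := (contB lines).mpr hex
    rw [h] at this; exact absurd this (by simp)
  · intro h
    cases hcb : (lines.map (fun ln => PySem.Str.startswith ln "+" || PySem.Str.startswith ln "-")).contains true
    · rfl
    · exact absurd ((contB lines).mp hcb) h

-- membership in port A's window-marking double loop
theorem mem_window_fold (ctx : Int) (nn : Int) (ch : List Int)
    (s : PySem.Set Int) (x : Int) :
    (x ∈ ch.foldl (fun v idx =>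
        (PySem.List.pyRange (-ctx) (ctx + 1) 1).foldl (fun v off =>
          if 0 ≤ idx + off ∧ idx + off < nn then PySem.Set.add v (idx + off) else v) v) s) ↔
      x ∈ s ∨ ∃ idx ∈ ch, 0 ≤ x ∧ x < nn ∧ idx - ctx ≤ x ∧ x ≤ idx + ctx := by
  induction ch generalizing s with
  | nil => simp
  | cons a ch ih =>
    rw [List.foldl_cons, ih]
    rw [mem_foldl_ite_add (PySem.List.pyRange (-ctx) (ctx + 1) 1)
        (fun off => 0 ≤ a + off ∧ a + off < nn) (fun off => a + off) s x]
    constructor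
    · rintro ((hs | ⟨off, hoff, ⟨h1, h2⟩, rfl⟩) | ⟨idx, hidx, hb⟩)
      · exact Or.inl hs
      · rw [PySem.List.mem_pyRange_one] at hoff
        exact Or.inr ⟨a, List.mem_cons_self, h1, h2, by omega, by omega⟩
      · exact Or.inr ⟨idx, List.mem_cons_of_mem a hidx, hb⟩
    · rintro (hs | ⟨idx, hidx, h1, h2, h3, h4⟩)
      · exact Or.inl (Or.inl hs)
      · rcases List.mem_cons.mp hidx with rfl | hm
        · refine Or.inl (Or.inr ⟨x - idx, ?_, ⟨by omega, by omega⟩, by ring⟩)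
          rw [PySem.List.mem_pyRange_one]; omega
        · exact Or.inr ⟨idx, hm, h1, h2, h3, h4⟩

-- membership in port A's full visibility set
theorem mem_visibleA (lines : List String) (context : Int) (x : Int) :
    (x ∈ (PySem.List.enumerate lines).foldl (fun v p =>
        if PySem.Str.startswith p.2 "@@" || PySem.Str.startswith p.2 "---" ||
           PySem.Str.startswith p.2 "+++" then PySem.Set.add v p.1 else v)
      (((PySem.List.enumerate lines).foldl (fun s p =>
          if PySem.Str.startswith p.2 "+" || PySem.Str.startswith p.2 "-" then
            if PySem.Str.startswith p.2 "---" || PySem.Str.startswith p.2 "+++" then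
              PySem.Set.add s p.1
            else
              PySem.Set.add s p.1
          else s) PySem.Set.empty).foldl (fun v idx =>
          (PySem.List.pyRange (-context) (context + 1) 1).foldl (fun v off =>
            if 0 ≤ idx + off ∧ idx + off < (lines.length : Int) then PySem.Set.add v (idx + off) else v) v)
        PySem.Set.empty)) ↔
      ((∃ k : Nat, k < lines.length ∧
          (PySem.Str.startswith (lines.getD k "") "+" || PySem.Str.startswith (lines.getD k "") "-") = true ∧
          (k : Int) - context ≤ x ∧ x ≤ (k : Int) + context ∧ 0 ≤ x ∧ x < (lines.length : Int)) ∨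
       (∃ k : Nat, k < lines.length ∧ x = (k : Int) ∧
          (PySem.Str.startswith (lines.getD k "") "@@" || PySem.Str.startswith (lines.getD k "") "---" ||
           PySem.Str.startswith (lines.getD k "") "+++") = true)) := by
  rw [mem_foldl_add_bool (PySem.List.enumerate lines)
      (fun p => PySem.Str.startswith p.2 "@@" || PySem.Str.startswith p.2 "---" ||
        PySem.Str.startswith p.2 "+++") (fun p => p.1) _ x]
  rw [mem_window_fold context (lines.length : Int) _ PySem.Set.empty x]
  constructor
  · rintro ((he | ⟨idx, hidx, hb⟩) | ⟨p, hp, hq, rfl⟩)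
    · exact absurd he (by simp [PySem.Set.empty])
    · rcases (mem_changeA lines idx).mp hidx with ⟨k, hk, rfl, hchg⟩
      exact Or.inl ⟨k, hk, hchg, hb.2.2.1, hb.2.2.2, hb.1, hb.2.1⟩
    · rcases (PySem.List.mem_enumerate_iff lines 0 p).mp hp with ⟨k, hk, rfl⟩
      refine Or.inr ⟨k, hk, by simp, ?_⟩
      rw [List.getD_eq_getElem _ _ hk]; simpa using hq
  · rintro (⟨k, hk, hchg, h1, h2, h3, h4⟩ | ⟨k, hk, rfl, hhdr⟩)
    · exact Or.inl (Or.inr ⟨(k : Int), (mem_changeA lines _).mpr ⟨k, hk, rfl, hchg⟩, h3, h4, h1, h2⟩)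
    · refine Or.inr ⟨((0 : Int) + (k : Int), lines[k]'hk),
        (PySem.List.mem_enumerate_iff lines 0 _).mpr ⟨k, hk, rfl⟩, ?_, by simp⟩
      rw [List.getD_eq_getElem _ _ hk] at hhdr; simpa using hhdr

-- port B's min-distance test picks out exactly the context windows around changes
theorem minB_le_iff (lines : List String) (context i : Int) (hctx : 0 ≤ context)
    (hi0 : 0 ≤ i) (hin : i < (lines.length : Int))
    (hex : ∃ k : Nat, k < lines.length ∧
      (PySem.Str.startswith (lines.getD k "") "+" || PySem.Str.startswith (lines.getD k "") "-") = true) :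
    (min
      (PySem.List.pyGetD ((lines.map (fun ln => PySem.Str.startswith ln "+" || PySem.Str.startswith ln "-")).foldl
          (fun (st : List Int × Int) c =>
            (st.1 ++ [if c then 0 else min (st.2 + 1) (lines.length : Int)],
             if c then 0 else min (st.2 + 1) (lines.length : Int))) ([], (lines.length : Int))).1
        i (lines.length : Int))
      (PySem.List.pyGetD ((lines.map (fun ln => PySem.Str.startswith ln "+" || PySem.Str.startswith ln "-")).reverse.foldl
          (fun (st : List Int × Int) c =>
            (st.1 ++ [if c then 0 else min (st.2 + 1) (lines.length : Int)],
             if c then 0 else min (st.2 + 1) (lines.length : Int))) ([], (lines.length : Int))).1.reverse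
        i (lines.length : Int)) ≤ context) ↔
    ∃ k : Nat, k < lines.length ∧
      (PySem.Str.startswith (lines.getD k "") "+" || PySem.Str.startswith (lines.getD k "") "-") = true ∧
      (k : Int) - context ≤ i ∧ i ≤ (k : Int) + context := by
  have hcl : (lines.map (fun ln => PySem.Str.startswith ln "+" || PySem.Str.startswith ln "-")).length = lines.length := by
    simp
  set cs := lines.map (fun ln => PySem.Str.startswith ln "+" || PySem.Str.startswith ln "-") with hcs
  have hti : ((i.toNat : Int)) = i := Int.toNat_of_nonneg hi0
  have hnn : (0 : Int) ≤ (lines.length : Int) := Int.natCast_nonneg _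
  have hconv : ∀ j : Nat, j < lines.length →
      cs.getD j false = (PySem.Str.startswith (lines.getD j "") "+" || PySem.Str.startswith (lines.getD j "") "-") := by
    intro j hj
    rw [List.getD_eq_getElem?_getD, hcs, List.getElem?_map, List.getElem?_eq_getElem hj,
        List.getD_eq_getElem _ _ hj]
    rfl
  have hconvr : ∀ j : Nat, j < lines.length →
      cs.reverse.getD j false = cs.getD (lines.length - 1 - j) false := by
    intro j hj
    rw [List.getD_eq_getElem?_getD, List.getD_eq_getElem?_getD,
        List.getElem?_reverse (by rw [hcl]; exact hj), hcl]
  rw [sweep_fold, sweep_fold, List.nil_append, List.nil_append]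
  rw [PySem.List.pyGetD_eq_getElem _ _ hi0 (by rw [length_sweepD, hcl]; exact hin),
      PySem.List.pyGetD_eq_getElem _ _ hi0
        (by rw [List.length_reverse, length_sweepD, List.length_reverse, hcl]; exact hin)]
  rw [List.getElem_reverse]
  have hL : (sweepD (lines.length : Int) (lines.length : Int) cs.reverse).length = lines.length := by
    rw [length_sweepD, List.length_reverse, hcl]
  rw [min_le_iff]
  rw [sweepD_le cs (lines.length : Int) (lines.length : Int) hnn (le_refl _) i.toNat
        (by rw [hcl]; omega) context,
      sweepD_le cs.reverse (lines.length : Int) (lines.length : Int) hnn (le_refl _)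
        ((sweepD (lines.length : Int) (lines.length : Int) cs.reverse).length - 1 - i.toNat)
        (by rw [hL, List.length_reverse, hcl]; omega) context]
  constructor
  · rintro (h | h)
    · rcases h with ⟨j, hj, hcj, hd⟩ | h2 | h2
      · rw [hconv j (by omega)] at hcj
        exact ⟨j, by omega, hcj, by omega, by omega⟩
      · rcases hex with ⟨k0, hk0, hc0⟩; exact ⟨k0, hk0, hc0, by omega, by omega⟩
      · rcases hex with ⟨k0, hk0, hc0⟩; exact ⟨k0, hk0, hc0, by omega, by omega⟩
    · rcases h with ⟨j, hj, hcj, hd⟩ | h2 | h2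
      · rw [hconvr j (by omega), hconv _ (by omega)] at hcj
        exact ⟨lines.length - 1 - j, by omega, hcj, by omega, by omega⟩
      · rcases hex with ⟨k0, hk0, hc0⟩; exact ⟨k0, hk0, hc0, by omega, by omega⟩
      · rcases hex with ⟨k0, hk0, hc0⟩; exact ⟨k0, hk0, hc0, by omega, by omega⟩
  · rintro ⟨k, hk, hchg, hb1, hb2⟩
    by_cases hki : k ≤ i.toNat
    · exact Or.inl (Or.inl ⟨k, hki, by rw [hconv k hk]; exact hchg, by omega⟩)
    · refine Or.inr (Or.inl ⟨lines.length - 1 - k, by omega, ?_, by omega⟩)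
      rw [hconvr _ (by omega), show lines.length - 1 - (lines.length - 1 - k) = k from by omega,
          hconv k hk]
      exact hchg

-- pointwise: A's visibility membership test equals B's filter predicate on 0 ≤ i < n
theorem point_eq (lines : List String) (context : Int) (hctx : 0 ≤ context)
    (hex : ∃ k : Nat, k < lines.length ∧
      (PySem.Str.startswith (lines.getD k "") "+" || PySem.Str.startswith (lines.getD k "") "-") = true)
    (i : Int) (hi0 : 0 ≤ i) (hin : i < (lines.length : Int)) :
    decide (i ∈ (PySem.List.enumerate lines).foldl (fun v p =>
        if PySem.Str.startswith p.2 "@@" || PySem.Str.startswith p.2 "---" ||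
           PySem.Str.startswith p.2 "+++" then PySem.Set.add v p.1 else v)
      (((PySem.List.enumerate lines).foldl (fun s p =>
          if PySem.Str.startswith p.2 "+" || PySem.Str.startswith p.2 "-" then
            if PySem.Str.startswith p.2 "---" || PySem.Str.startswith p.2 "+++" then
              PySem.Set.add s p.1
            else
              PySem.Set.add s p.1
          else s) PySem.Set.empty).foldl (fun v idx =>
          (PySem.List.pyRange (-context) (context + 1) 1).foldl (fun v off =>
            if 0 ≤ idx + off ∧ idx + off < (lines.length : Int) then PySem.Set.add v (idx + off) else v) v)
        PySem.Set.empty)) =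
    (decide (min
        (PySem.List.pyGetD ((lines.map (fun ln => PySem.Str.startswith ln "+" || PySem.Str.startswith ln "-")).foldl
            (fun (st : List Int × Int) c =>
              (st.1 ++ [if c then 0 else min (st.2 + 1) (lines.length : Int)],
               if c then 0 else min (st.2 + 1) (lines.length : Int))) ([], (lines.length : Int))).1
          i (lines.length : Int))
        (PySem.List.pyGetD ((lines.map (fun ln => PySem.Str.startswith ln "+" || PySem.Str.startswith ln "-")).reverse.foldl
            (fun (st : List Int × Int) c =>
              (st.1 ++ [if c then 0 else min (st.2 + 1) (lines.length : Int)],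
               if c then 0 else min (st.2 + 1) (lines.length : Int))) ([], (lines.length : Int))).1.reverse
          i (lines.length : Int)) ≤ context) ||
      PySem.Str.startswith (PySem.List.pyGetD lines i "") "@@" ||
      PySem.Str.startswith (PySem.List.pyGetD lines i "") "---" ||
      PySem.Str.startswith (PySem.List.pyGetD lines i "") "+++") := by
  have hA := mem_visibleA lines context i
  have hB := minB_le_iff lines context i hctx hi0 hin hex
  have hti : ((i.toNat : Int)) = i := Int.toNat_of_nonneg hi0
  have hW : (∃ k : Nat, k < lines.length ∧
      (PySem.Str.startswith (lines.getD k "") "+" || PySem.Str.startswith (lines.getD k "") "-") = true ∧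
      (k : Int) - context ≤ i ∧ i ≤ (k : Int) + context ∧ 0 ≤ i ∧ i < (lines.length : Int)) ↔
      (∃ k : Nat, k < lines.length ∧
      (PySem.Str.startswith (lines.getD k "") "+" || PySem.Str.startswith (lines.getD k "") "-") = true ∧
      (k : Int) - context ≤ i ∧ i ≤ (k : Int) + context) := by
    constructor
    · rintro ⟨k, a, b, c, d, _, _⟩; exact ⟨k, a, b, c, d⟩
    · rintro ⟨k, a, b, c, d⟩; exact ⟨k, a, b, c, d, hi0, hin⟩
  have hH : (∃ k : Nat, k < lines.length ∧ i = (k : Int) ∧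
      (PySem.Str.startswith (lines.getD k "") "@@" || PySem.Str.startswith (lines.getD k "") "---" ||
       PySem.Str.startswith (lines.getD k "") "+++") = true) ↔
      ((PySem.Str.startswith (lines.getD i.toNat "") "@@" || PySem.Str.startswith (lines.getD i.toNat "") "---" ||
        PySem.Str.startswith (lines.getD i.toNat "") "+++") = true) := by
    constructor
    · rintro ⟨k, hk, rfl, h⟩
      rw [show ((k : Int)).toNat = k from by omega]
      exact h
    · intro h
      exact ⟨i.toNat, by omega, hti.symm, h⟩
  rw [PySem.List.pyGetD_eq_getElem lines "" hi0 hin,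
      ← List.getD_eq_getElem lines "" (show i.toNat < lines.length from by omega)]
  have hiff := hA.trans (or_congr (hW.trans hB.symm) hH)
  rw [decide_eq_decide.mpr hiff] <;> try infer_instance
  simp [Bool.or_assoc]

-- ===== VERDICT (by name: the statement is the Claim_ definition above) =====
theorem fold_unchanged_py_spec : Claim_equal_fold_unchanged_py := by
  intro lines context _
  unfold Spec_fold_unchanged_py fold_unchanged_py fold_unchanged_py_alt
  by_cases hc : context < 0
  · rw [if_pos hc, if_pos hc]
  · simp only [if_neg hc]
    by_cases hx : ∃ k : Nat, k < lines.length ∧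
        (PySem.Str.startswith (lines.getD k "") "+" || PySem.Str.startswith (lines.getD k "") "-") = true
    · rw [if_neg (fun h => (changeA_eq_nil_iff lines).mp h hx),
          if_neg (fun h => (guardB_iff lines).mp h hx)]
      rw [PySem.List.foldl_ite_eq_foldl_filter]
      rw [List.filter_congr (fun i hi =>
        point_eq lines context (not_lt.mp hc) hx i
          ((PySem.List.mem_pyRange_one.mp hi).1)
          (by simpa using (PySem.List.mem_pyRange_one.mp hi).2))]
      exact if_congr ⟨fun h => ⟨h.2, h.1⟩, fun h => ⟨h.2, h.1⟩⟩ rfl rfl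
    · rw [if_pos ((changeA_eq_nil_iff lines).mpr hx), if_pos ((guardB_iff lines).mpr hx)]
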